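-- pv_equiv track=rewrite | github.com/morteano/IT3708 | Assignment4/eaAssignment4.py | findUnsuprisesLocal
-- ===== SOURCE A (Python) =====
-- def findUnsuprisesLocal(genotype):
--     unsuprises = 0
--     for i in range(1, len(genotype)-2):
--         first = genotype[i-1]
--         second = genotype[i]
--         for j in range(i, len(genotype)-1):
--             if genotype[j] == first:
--                 if genotype[j+1] == second:
--                     unsuprises += 1
--     return unsuprises
-- ===== SOURCE B (Python) =====
-- def findUnsuprisesLocal(genotype):
--     n = len(genotype)
--     pairs = list(zip(genotype, genotype[1:]))
--     counts = {}
--     total = 0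
--     for k in range(n - 2, -1, -1):
--         p = pairs[k]
--         if k <= n - 4:
--             total += counts.get(p, 0)
--         counts[p] = counts.get(p, 0) + 1
--     return total
-- ===== Notes on version B (the rewrite author's own statement) =====
-- stated objective: faster
-- what changed: replaces A's nested O(n^2) rescan (for each query position, rescan the rest of the list for the matching consecutive pair) by a single right-to-left pass over the list of consecutive pairs that maintains a dict counter of pairs already seen and adds the counter value at each query position
import Mathlib
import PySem

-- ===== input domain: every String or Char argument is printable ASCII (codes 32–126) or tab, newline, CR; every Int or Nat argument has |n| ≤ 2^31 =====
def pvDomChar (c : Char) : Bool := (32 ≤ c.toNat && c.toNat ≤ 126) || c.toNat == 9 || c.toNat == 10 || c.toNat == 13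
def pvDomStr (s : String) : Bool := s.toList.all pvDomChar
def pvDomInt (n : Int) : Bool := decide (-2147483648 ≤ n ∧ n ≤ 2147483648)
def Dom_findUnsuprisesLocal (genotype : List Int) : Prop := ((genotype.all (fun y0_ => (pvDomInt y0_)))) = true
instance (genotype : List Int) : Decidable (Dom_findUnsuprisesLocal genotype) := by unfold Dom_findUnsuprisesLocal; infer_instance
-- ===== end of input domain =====

-- B replaces A's quadratic nested scan by a single right-to-left pass over the list of
-- consecutive pairs with a dictionary counter of pairs already seen (objective: faster, asymptotic).

-- ===== PORT A =====
def findUnsuprisesLocal (genotype : List Int) : Int :=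
  (PySem.List.pyRange 1 ((genotype.length : Int) - 2) 1).foldl (fun unsuprises i =>
    let first := PySem.List.pyGetD genotype (i - 1) 0
    let second := PySem.List.pyGetD genotype i 0
    (PySem.List.pyRange i ((genotype.length : Int) - 1) 1).foldl (fun acc j =>
      if PySem.List.pyGetD genotype j 0 = first then
        if PySem.List.pyGetD genotype (j + 1) 0 = second then acc + 1 else acc
      else acc) unsuprises) 0

-- ===== PORT B =====
def findUnsuprisesLocal_alt (genotype : List Int) : Int :=
  let n : Int := genotype.length
  let pairs : List (Int × Int) := genotype.zip (genotype.drop 1)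
  let r := (PySem.List.pyRange (n - 2) (-1) (-1)).foldl
    (fun (st : PySem.Dict (Int × Int) Int × Int) k =>
      let p := PySem.List.pyGetD pairs k (0, 0)
      let total := if k ≤ n - 4 then st.2 + st.1.getD p 0 else st.2
      (st.1.insert p (st.1.getD p 0 + 1), total))
    (PySem.Dict.empty, 0)
  r.2

-- ===== PRECONDITION & SPEC =====
def Spec_findUnsuprisesLocal (genotype : List Int) (out : Int) : Prop := out = findUnsuprisesLocal_alt genotype
instance (genotype : List Int) (out : Int) : Decidable (Spec_findUnsuprisesLocal genotype out) := by unfold Spec_findUnsuprisesLocal; infer_instance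

-- ===== CLAIM (what is proved, stated in full; the proofs are below) =====
def Claim_equal_findUnsuprisesLocal : Prop := ∀ (genotype : List Int), Dom_findUnsuprisesLocal genotype → Spec_findUnsuprisesLocal genotype (findUnsuprisesLocal genotype)

-- ===== LEMMAS AND PROOFS =====

-- the pair list indexed at j yields (g[j], g[j+1])
lemma pairIndex (g : List Int) (j : Int) (h0 : 0 ≤ j)
    (h1 : j < ((g.zip (g.drop 1)).length : Int)) :
    PySem.List.pyGetD (g.zip (g.drop 1)) j (0, 0)
      = (PySem.List.pyGetD g j 0, PySem.List.pyGetD g (j + 1) 0) := by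
  have hlen : (g.zip (g.drop 1)).length = g.length - 1 := by
    simp [List.length_zip]
  rw [PySem.List.pyGetD_eq_getElem _ _ h0 h1,
      PySem.List.pyGetD_eq_getElem g 0 h0 (by omega : j < (g.length : Int)),
      PySem.List.pyGetD_eq_getElem g 0 (by omega : (0:Int) ≤ j + 1) (by omega : j + 1 < (g.length : Int))]
  simp only [List.getElem_zip]
  refine Prod.ext rfl ?_
  simp only [List.getElem_drop]
  congr 1
  omega

-- B's loop computes the guarded sum of later-pair counts
lemma Bloop (P : List (Int × Int)) (N : Int) (_hN : N = (P.length : Int) + 1) :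
    ∀ (m : Nat), m ≤ P.length → ∀ (d : PySem.Dict (Int × Int) Int) (t : Int),
    (∀ q, d.getD q 0 = ((P.drop m).count q : Int)) →
    ((PySem.List.pyRange ((m : Int) - 1) (-1) (-1)).foldl
      (fun (st : PySem.Dict (Int × Int) Int × Int) k =>
        let p := PySem.List.pyGetD P k (0, 0)
        let total := if k ≤ N - 4 then st.2 + st.1.getD p 0 else st.2
        (st.1.insert p (st.1.getD p 0 + 1), total)) (d, t)).2
    = t + ((List.range m).map (fun (k : Nat) =>
        if (k : Int) ≤ N - 4 then (((P.drop (k + 1)).count (P.getD k (0, 0))) : Int) else 0)).sum := by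
  intro m
  induction m with
  | zero =>
    intro _ d t _
    rw [show ((0 : Nat) : Int) - 1 = -1 by norm_num]
    rw [PySem.List.pyRange_neg_one_eq_nil (by norm_num)]
    simp
  | succ m ih =>
    intro hm d t hd
    have hmP : m < P.length := hm
    rw [show (((m + 1 : Nat)) : Int) - 1 = (m : Int) by push_cast; ring]
    rw [PySem.List.pyRange_neg_one_cons (by omega : (-1 : Int) < (m : Int))]
    simp only [List.foldl_cons]
    rw [PySem.List.pyGetD_natCast]
    have hgetD : P.getD m (0, 0) = P[m] := List.getD_eq_getElem P (0, 0) hmP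
    have hdrop : P.drop m = P[m] :: P.drop (m + 1) := List.drop_eq_getElem_cons hmP
    have hd' : ∀ q, ((d.insert (P.getD m (0, 0)) (d.getD (P.getD m (0, 0)) 0 + 1)).getD q 0)
        = (((P.drop m).count q) : Int) := by
      intro q
      rw [PySem.Dict.getD_insert, hdrop, hgetD]
      by_cases hq : q = P[m]
      · rw [if_pos hq, hd, hq, List.count_cons_self]
        push_cast; ring
      · rw [if_neg hq, hd, List.count_cons]; simp [Ne.symm hq]
    rw [ih (by omega) _ _ hd']
    rw [List.range_succ, List.map_append, List.sum_append]
    simp only [List.map_cons, List.map_nil, List.sum_cons, List.sum_nil]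
    rw [hd (P.getD m (0, 0))]
    split_ifs <;> ring

-- dropping the always-false tail of a guarded range sum
lemma sum_range_ite (c : Nat → Int) (t : Nat) :
    ∀ d, ((List.range (t + d)).map (fun k => if k < t then c k else 0)).sum
      = ((List.range t).map c).sum := by
  intro d
  induction d with
  | zero =>
    rw [Nat.add_zero]
    congr 1
    apply List.map_congr_left
    intro k hk
    rw [if_pos (List.mem_range.mp hk)]
  | succ d ih =>
    rw [show t + (d + 1) = (t + d) + 1 from rfl, List.range_succ, List.map_append, List.sum_append]
    simp only [List.map_cons, List.map_nil, List.sum_cons, List.sum_nil]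
    rw [if_neg (by omega)]
    rw [ih]
    ring

-- A equals the unguarded sum over query positions 0 .. n-4
lemma Aval (g : List Int) :
    findUnsuprisesLocal g
      = ((List.range (((g.length : Int) - 3).toNat)).map (fun k =>
          ((((g.zip (g.drop 1)).drop (k + 1)).count ((g.zip (g.drop 1)).getD k (0, 0))) : Int))).sum := by
  have hPlen : (g.zip (g.drop 1)).length = g.length - 1 := by
    simp [List.length_zip]
  unfold findUnsuprisesLocal
  rw [PySem.List.foldl_congr_mem _ _ (fun (uns i : Int) =>
      uns + ((((g.zip (g.drop 1)).drop i.toNat).count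
        (PySem.List.pyGetD (g.zip (g.drop 1)) (i - 1) (0, 0))) : Int)) 0 ?hc]
  case hc =>
    intro uns i hi
    obtain ⟨h1, h2⟩ := PySem.List.mem_pyRange_one.mp hi
    have hg4 : 4 ≤ g.length := by omega
    rw [PySem.List.foldl_congr_mem _ _ (fun (acc : Int) (j : Int) =>
        if PySem.List.pyGetD (g.zip (g.drop 1)) j (0, 0)
            == (PySem.List.pyGetD g (i - 1) 0, PySem.List.pyGetD g i 0)
          then acc + 1 else acc) uns ?inner]
    case inner =>
      intro acc j hj
      obtain ⟨h3, h4⟩ := PySem.List.mem_pyRange_one.mp hj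
      beta_reduce
      rw [pairIndex g j (by omega) (by omega)]
      by_cases hA : PySem.List.pyGetD g j 0 = PySem.List.pyGetD g (i - 1) 0 <;>
        by_cases hB : PySem.List.pyGetD g (j + 1) 0 = PySem.List.pyGetD g i 0 <;>
        simp [hA, hB, Prod.ext_iff]
    rw [show (g.length : Int) - 1 = ((g.zip (g.drop 1)).length : Int) by omega]
    rw [PySem.List.foldl_pyRange_pyGetD' (g.zip (g.drop 1)) (0, 0)
      (fun acc p => if p == (PySem.List.pyGetD g (i - 1) 0, PySem.List.pyGetD g i 0)
        then acc + 1 else acc) uns (by omega : (0 : Int) ≤ i)]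
    rw [PySem.List.foldl_beq_add_one]
    have hpr := pairIndex g (i - 1) (by omega) (by omega)
    rw [show i - 1 + 1 = i by ring] at hpr
    rw [← hpr]
  rw [PySem.List.foldl_add, zero_add]
  rw [show (g.length : Int) - 2 = ((g.length : Int) - 3) + 1 by ring]
  rw [PySem.List.pyRange_one, List.map_map]
  rw [show ((g.length : Int) - 3 + 1 - 1) = (g.length : Int) - 3 by ring]
  apply congrArg
  apply List.map_congr_left
  intro k hk
  simp only [Function.comp_apply]
  rw [show (1 : Int) + (k : Int) - 1 = ((k : Nat) : Int) by ring, PySem.List.pyGetD_natCast,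
    show ((1 : Int) + (k : Int)).toNat = k + 1 by omega]

-- ===== VERDICT (by name: the statement is the Claim_ definition above) =====
theorem findUnsuprisesLocal_spec : Claim_equal_findUnsuprisesLocal := by
  intro g _
  unfold Spec_findUnsuprisesLocal
  by_cases hg : g = []
  · subst hg; rfl
  · have hglen : 1 ≤ g.length := List.length_pos_iff.mpr hg
    have hPlen : (g.zip (g.drop 1)).length = g.length - 1 := by
      simp [List.length_zip]
    unfold findUnsuprisesLocal_alt
    simp only []
    rw [show (g.length : Int) - 2 = (((g.zip (g.drop 1)).length : Nat) : Int) - 1 by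
      push_cast [hPlen]; omega]
    rw [Bloop (g.zip (g.drop 1)) (g.length : Int) (by push_cast [hPlen]; omega)
      (g.zip (g.drop 1)).length le_rfl PySem.Dict.empty 0
      (by intro q; rw [PySem.Dict.getD_empty, List.drop_length]; simp)]
    rw [zero_add, Aval]
    have hguard : (fun (k : Nat) =>
        if (k : Int) ≤ (g.length : Int) - 4
          then (((g.zip (g.drop 1)).drop (k + 1)).count ((g.zip (g.drop 1)).getD k (0, 0)) : Int)
          else 0)
      = (fun (k : Nat) =>
        if k < ((g.length : Int) - 3).toNat
          then (((g.zip (g.drop 1)).drop (k + 1)).count ((g.zip (g.drop 1)).getD k (0, 0)) : Int)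
          else 0) := by
      funext k
      by_cases h : (k : Int) ≤ (g.length : Int) - 4
      · rw [if_pos h, if_pos (by omega)]
      · rw [if_neg h, if_neg (by omega)]
    rw [hguard]
    rw [show (g.zip (g.drop 1)).length
        = ((g.length : Int) - 3).toNat + ((g.zip (g.drop 1)).length - ((g.length : Int) - 3).toNat)
      by omega]
    rw [sum_range_ite]
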